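-- pv_equiv track=rewrite | github.com/TPIOS/LeetCode-cn-solutions | 0955_2.py | haveNotSet
-- ===== SOURCE A (Python) =====
-- def haveNotSet(strs, lastcheck = -1):
--     n = len(strs)
--     if lastcheck == -1:
--         for i in range(0, n-1):
--             if strs[i+1] < strs[i]:
--                 return True
--         return False
--     else:
--         for i in range(n):
--             strs[i] = strs[i][:lastcheck+1]
--         for i in range(0, n-1):
--             if strs[i+1] < strs[i]:
--                 return True
--         return False
-- ===== SOURCE B (Python) =====
-- def haveNotSet(strs, lastcheck = -1):
--     if lastcheck != -1:
--         strs[:] = [s[:lastcheck+1] for s in strs]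
--     return strs != sorted(strs)
-- ===== Notes on version B (the rewrite author's own statement) =====
-- stated objective: simpler
-- what changed: B replaces A's index-based adjacent-pair scan (in both branches) with one truncation pass followed by a sort-and-compare: it returns strs != sorted(strs).
import Mathlib
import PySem

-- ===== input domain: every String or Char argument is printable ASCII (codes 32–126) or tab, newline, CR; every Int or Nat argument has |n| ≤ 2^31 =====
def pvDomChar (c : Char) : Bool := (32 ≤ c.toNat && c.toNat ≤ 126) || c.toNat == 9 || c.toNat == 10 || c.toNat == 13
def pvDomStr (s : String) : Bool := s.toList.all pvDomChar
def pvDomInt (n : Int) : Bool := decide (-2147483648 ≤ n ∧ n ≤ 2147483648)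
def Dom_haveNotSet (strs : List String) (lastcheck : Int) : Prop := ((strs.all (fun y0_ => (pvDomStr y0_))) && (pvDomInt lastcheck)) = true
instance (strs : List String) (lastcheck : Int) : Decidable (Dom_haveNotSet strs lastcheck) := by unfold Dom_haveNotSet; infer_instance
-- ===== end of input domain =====

-- B is simpler: it truncates (mutating the list in place, exactly as A does in its else branch)
-- and then compares the list with its sorted copy, instead of A's adjacent-pair index scan.
-- Both versions mutate the argument list in place when lastcheck != -1; the theorems are about the return value.

-- ===== PORT A =====
-- the adjacent-pair scan 'for i in range(0, n-1): if strs[i+1] < strs[i]: return True' / 'return False'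
def haveNotSetScan : List String → Bool
  | a :: b :: rest => if b < a then true else haveNotSetScan (b :: rest)
  | _ => false

def haveNotSet (strs : List String) (lastcheck : Int) : Bool :=
  if lastcheck = -1 then
    haveNotSetScan strs
  else
    haveNotSetScan (strs.map (fun s => PySem.Str.slice s none (some (lastcheck + 1))))

-- ===== PORT B =====
def haveNotSet_alt (strs : List String) (lastcheck : Int) : Bool :=
  let t := if lastcheck = -1 then strs
           else strs.map (fun s => PySem.Str.slice s none (some (lastcheck + 1)))
  decide (t ≠ PySem.List.sorted t (fun x => x) false)

-- ===== PRECONDITION & SPEC =====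
def Spec_haveNotSet (strs : List String) (lastcheck : Int) (out : Bool) : Prop := out = haveNotSet_alt strs lastcheck
instance (strs : List String) (lastcheck : Int) (out : Bool) : Decidable (Spec_haveNotSet strs lastcheck out) := by unfold Spec_haveNotSet; infer_instance

-- ===== CLAIM (what is proved, stated in full; the proofs are below) =====
def Claim_equal_haveNotSet : Prop := ∀ (strs : List String) (lastcheck : Int), Dom_haveNotSet strs lastcheck → Spec_haveNotSet strs lastcheck (haveNotSet strs lastcheck)

-- ===== LEMMAS AND PROOFS =====

-- the scan returns false exactly on adjacent-chain-ordered lists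
theorem haveNotSetScan_eq_false_iff (l : List String) :
    haveNotSetScan l = false ↔ l.IsChain (· ≤ ·) := by
  induction l with
  | nil => simp [haveNotSetScan, List.IsChain.nil]
  | cons a t ih =>
    cases t with
    | nil => simp [haveNotSetScan, List.IsChain.singleton a]
    | cons b r =>
      rw [List.isChain_cons_cons]
      by_cases h : b < a
      · simp [haveNotSetScan, h, not_le.mpr h]
      · simp [haveNotSetScan, h, not_lt.mp h, ih]

-- the scan agrees with 'l != sorted(l)'
theorem haveNotSetScan_eq_sorted (l : List String) :
    haveNotSetScan l = decide (l ≠ PySem.List.sorted l (fun x => x) false) := by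
  by_cases hs : PySem.List.sorted l (fun x => x) false = l
  · have hp : l.Pairwise (· ≤ ·) := by
      have := PySem.List.sorted_pairwise l (fun x => x)
      rw [hs] at this
      exact this
    have : haveNotSetScan l = false :=
      (haveNotSetScan_eq_false_iff l).mpr (List.isChain_iff_pairwise.mpr hp)
    simp [this, hs]
  · have : haveNotSetScan l ≠ false := by
      intro hf
      have hp : l.Pairwise (· ≤ ·) :=
        List.isChain_iff_pairwise.mp ((haveNotSetScan_eq_false_iff l).mp hf)
      exact hs (PySem.List.sorted_eq_self_of_pairwise l (fun x => x) hp)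
    simp only [ne_eq, Bool.not_eq_false] at this
    simp [this]
    exact fun h => hs h.symm

-- ===== VERDICT (by name: the statement is the Claim_ definition above) =====
theorem haveNotSet_spec : Claim_equal_haveNotSet := by
  intro strs lastcheck _
  unfold Spec_haveNotSet haveNotSet haveNotSet_alt
  by_cases h : lastcheck = -1 <;>
    simp [h, haveNotSetScan_eq_sorted]
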